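-- pv_equiv track=rewrite | github.com/SujayBelsare/precogstuff | codes/verifier.py | can_reduce_to_empty
-- ===== SOURCE A (Python) =====
-- import collections
--
-- def can_reduce_to_empty(initial_string, transitions):
--     queue = collections.deque([(initial_string, 0)])  # Store string and depth
--     visited = set()
--
--     while queue:
--         current_string, depth = queue.popleft()
--
--         if depth > 10:
--             return False  # Depth limit exceeded
--
--         if current_string == "":
--             return True  # Successfully reduced to empty
--
--         if current_string in visited:
--             continue
--         visited.add(current_string)
--
--         for transition in transitions:
--             src, tgt = transition["src"], transition["tgt"]
--
--             if src in current_string: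
--                 new_string = current_string.replace(src, tgt, 1)
--                 if new_string not in visited:
--                     queue.append((new_string, depth + 1))
--
--     return False  # Could not reduce to empty within depth limit
-- ===== SOURCE B (Python) =====
-- def can_reduce_to_empty(initial_string, transitions):
--     def search(s, depth):
--         if depth > 10:
--             return False
--         if s == "":
--             return True
--         for transition in transitions:
--             src, tgt = transition["src"], transition["tgt"]
--             if src in s and search(s.replace(src, tgt, 1), depth + 1):
--                 return True
--         return False
--     return search(initial_string, 0)
-- ===== Notes on version B (the rewrite author's own statement) =====
-- stated objective: alternative
-- what changed: Replaces the deque-based breadth-first search with a visited set by a recursive depth-limited depth-first search that keeps no visited/memo state and backtracks, returning on the first successful reduction path of length at most 10.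
import Mathlib
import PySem

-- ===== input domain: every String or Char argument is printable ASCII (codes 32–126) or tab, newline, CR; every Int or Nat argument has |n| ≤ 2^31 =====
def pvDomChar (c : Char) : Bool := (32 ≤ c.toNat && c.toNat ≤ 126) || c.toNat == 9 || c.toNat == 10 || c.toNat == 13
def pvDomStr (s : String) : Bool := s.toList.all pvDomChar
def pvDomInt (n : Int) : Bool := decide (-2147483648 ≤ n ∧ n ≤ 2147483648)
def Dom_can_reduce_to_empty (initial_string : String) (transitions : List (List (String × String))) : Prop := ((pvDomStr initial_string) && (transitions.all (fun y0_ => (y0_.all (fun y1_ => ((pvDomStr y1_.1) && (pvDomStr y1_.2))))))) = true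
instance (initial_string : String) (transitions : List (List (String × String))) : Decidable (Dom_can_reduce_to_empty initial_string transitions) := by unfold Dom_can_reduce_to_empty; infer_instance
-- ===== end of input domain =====

-- B replaces A's deque BFS + visited set by a recursive depth-limited backtracking DFS with no
-- cross-path state (alternative decomposition, not claimed faster); equal return value on Pre_.

-- shared primitive helpers (ports of Python built-ins both versions use)

-- transition["src"] / transition["tgt"]: first-match dict lookup; total form with default "",
-- used only under Pre_ (Python raises KeyError when the key is absent)
def pvSrc (t : List (String × String)) : String := (PySem.Dict.mk t).getD "src" ""
def pvTgt (t : List (String × String)) : String := (PySem.Dict.mk t).getD "tgt" ""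

-- exact port of Python s.replace(old, new, 1): replace the FIRST occurrence of old (if any);
-- for old = "" Python prepends new (find = 0). PySem.Str.replace has no count, so ported by hand.
def pyReplaceOne (s old new : String) : String :=
  let i := PySem.Chars.find s.toList old.toList
  if i = -1 then s
  else String.ofList (s.toList.take i.toNat ++ new.toList ++ s.toList.drop (i.toNat + old.toList.length))

-- ===== PORT A =====
-- the BFS loop: queue of (string, depth) pairs, visited set; depth kept as Nat (Python depths are 0,1,2,…)
def bfsWeight (W : Nat) (q : List (String × Nat)) : Nat :=
  (q.map (fun p => W ^ (12 - p.2))).sum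

lemma bfsWeight_pushes_le (W d : Nat) (f : List (String × Nat) → List (String × String) → List (String × Nat))
    (hf : ∀ acc t, f acc t = acc ∨ ∃ c, f acc t = acc ++ [(c, d + 1)]) :
    ∀ (ts : List (List (String × String))) (acc : List (String × Nat)),
      bfsWeight W (ts.foldl f acc) ≤ bfsWeight W acc + ts.length * W ^ (12 - (d + 1)) := by
  intro ts
  induction ts with
  | nil => intro acc; simp [List.foldl]
  | cons t ts ih =>
    intro acc
    have h1 : bfsWeight W (f acc t) ≤ bfsWeight W acc + W ^ (12 - (d + 1)) := by
      rcases hf acc t with h | ⟨c, h⟩ <;> simp [h, bfsWeight]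
    calc bfsWeight W ((t :: ts).foldl f acc) = bfsWeight W (ts.foldl f (f acc t)) := by simp [List.foldl]
      _ ≤ bfsWeight W (f acc t) + ts.length * W ^ (12 - (d + 1)) := ih (f acc t)
      _ ≤ bfsWeight W acc + W ^ (12 - (d + 1)) + ts.length * W ^ (12 - (d + 1)) := by omega
      _ = bfsWeight W acc + (t :: ts).length * W ^ (12 - (d + 1)) := by simp [List.length_cons]; ring

def bfsPushes (transitions : List (List (String × String))) (visited' : PySem.Set String)
    (current_string : String) (depth : Nat) : List (String × Nat) :=
  transitions.foldl (fun acc transition =>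
    let src := pvSrc transition
    let tgt := pvTgt transition
    if PySem.Str.isIn src current_string then
      let new_string := pyReplaceOne current_string src tgt
      if PySem.Set.contains visited' new_string then acc
      else acc ++ [(new_string, depth + 1)]
    else acc) []

lemma bfsPushes_weight_le (transitions : List (List (String × String))) (visited' : PySem.Set String)
    (current_string : String) (depth : Nat) :
    bfsWeight (transitions.length + 1) (bfsPushes transitions visited' current_string depth) ≤
      transitions.length * (transitions.length + 1) ^ (12 - (depth + 1)) := by
  have h := bfsWeight_pushes_le (transitions.length + 1) depth
    (fun acc transition =>
      let src := pvSrc transition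
      let tgt := pvTgt transition
      if PySem.Str.isIn src current_string then
        let new_string := pyReplaceOne current_string src tgt
        if PySem.Set.contains visited' new_string then acc
        else acc ++ [(new_string, depth + 1)]
      else acc)
    (by
      intro acc t
      dsimp only
      by_cases h1 : PySem.Str.isIn (pvSrc t) current_string
      · have h1' : PySem.Chars.isIn (pvSrc t).toList current_string.toList = true := by simpa using h1
        by_cases h2 : PySem.Set.contains visited' (pyReplaceOne current_string (pvSrc t) (pvTgt t))
        · have h2' : pyReplaceOne current_string (pvSrc t) (pvTgt t) ∈ visited' := by simpa using h2
          left; simp [h1', h2']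
        · have h2' : ¬ pyReplaceOne current_string (pvSrc t) (pvTgt t) ∈ visited' := by simpa using h2
          right
          refine ⟨pyReplaceOne current_string (pvSrc t) (pvTgt t), ?_⟩
          simp [h1', h2']
      · have h1' : ¬ PySem.Chars.isIn (pvSrc t).toList current_string.toList = true := by simpa using h1
        left; simp [h1']) transitions []
  have h0 : bfsWeight (transitions.length + 1) ([] : List (String × Nat)) = 0 := by simp [bfsWeight]
  rw [h0] at h
  simpa [bfsPushes] using h

def bfsGo (transitions : List (List (String × String))) :
    List (String × Nat) → PySem.Set String → Bool
  | [], _ => false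
  | (current_string, depth) :: rest, visited =>
    if 10 < depth then false
    else if current_string = "" then true
    else if PySem.Set.contains visited current_string then bfsGo transitions rest visited
    else
      let visited' := PySem.Set.add visited current_string
      bfsGo transitions (rest ++ bfsPushes transitions visited' current_string depth) visited'
  termination_by q _ => bfsWeight (transitions.length + 1) q
  decreasing_by
  · have hpos : 0 < (transitions.length + 1) ^ (12 - depth) := by positivity
    simp only [bfsWeight, List.map_cons, List.sum_cons]
    omega
  · have hp := bfsPushes_weight_le transitions (PySem.Set.add visited current_string) current_string depth
    have hexp : 12 - (depth + 1) = 11 - depth := by omega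
    have hsucc : 12 - depth = (11 - depth) + 1 := by omega
    have hpow : transitions.length * (transitions.length + 1) ^ (11 - depth) <
        (transitions.length + 1) ^ (12 - depth) := by
      rw [hsucc, pow_succ]
      have hpos : 0 < (transitions.length + 1) ^ (11 - depth) := by positivity
      nlinarith
    rw [hexp] at hp
    simp only [bfsWeight, List.map_append, List.sum_append, List.map_cons, List.sum_cons] at hp ⊢
    linarith

def can_reduce_to_empty (initial_string : String) (transitions : List (List (String × String))) : Bool :=
  bfsGo transitions [(initial_string, 0)] PySem.Set.empty

-- ===== PORT B =====
def dfsGo (transitions : List (List (String × String))) (s : String) (depth : Nat) : Bool :=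
  if 10 < depth then false
  else if s = "" then true
  else transitions.any (fun transition =>
    let src := pvSrc transition
    let tgt := pvTgt transition
    PySem.Str.isIn src s && dfsGo transitions (pyReplaceOne s src tgt) (depth + 1))
  termination_by 11 - depth
  decreasing_by omega

def can_reduce_to_empty_alt (initial_string : String) (transitions : List (List (String × String))) : Bool :=
  dfsGo transitions initial_string 0

-- ===== PRECONDITION & SPEC =====
-- Pre_ excludes exactly the inputs on which Python raises KeyError: a transition dict missing the
-- key "src" or "tgt" while the initial string is nonempty (both A and B evaluate transition["src"],
-- transition["tgt"] for every transition then; on initial_string = "" both return True first).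
def Pre_can_reduce_to_empty (initial_string : String) (transitions : List (List (String × String))) : Prop :=
  initial_string = "" ∨
    ∀ t ∈ transitions, (PySem.Dict.mk t).contains "src" = true ∧ (PySem.Dict.mk t).contains "tgt" = true
instance (initial_string : String) (transitions : List (List (String × String))) : Decidable (Pre_can_reduce_to_empty initial_string transitions) := by unfold Pre_can_reduce_to_empty; infer_instance

def pvWitness_can_reduce_to_empty : String × (List (List (String × String))) :=
  ("aab", [[("src", "ab"), ("tgt", "a")], [("src", "a"), ("tgt", "")]])

def Spec_can_reduce_to_empty (initial_string : String) (transitions : List (List (String × String))) (out : Bool) : Prop := out = can_reduce_to_empty_alt initial_string transitions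
instance (initial_string : String) (transitions : List (List (String × String))) (out : Bool) : Decidable (Spec_can_reduce_to_empty initial_string transitions out) := by unfold Spec_can_reduce_to_empty; infer_instance

-- ===== CLAIM (what is proved, stated in full; the proofs are below) =====
def Claim_equal_can_reduce_to_empty : Prop := ∀ (initial_string : String) (transitions : List (List (String × String))), Dom_can_reduce_to_empty initial_string transitions → Pre_can_reduce_to_empty initial_string transitions → Spec_can_reduce_to_empty initial_string transitions (can_reduce_to_empty initial_string transitions)

-- ===== LEMMAS AND PROOFS =====

-- one rewriting step: c is obtained from s by applying some transition
def Child (ts : List (List (String × String))) (s c : String) : Prop :=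
  ∃ t ∈ ts, PySem.Str.isIn (pvSrc t) s = true ∧ c = pyReplaceOne s (pvSrc t) (pvTgt t)

lemma dfsGo_unfold (ts : List (List (String × String))) (s : String) (d : Nat) :
    dfsGo ts s d = if 10 < d then false
      else if s = "" then true
      else ts.any (fun t => PySem.Str.isIn (pvSrc t) s && dfsGo ts (pyReplaceOne s (pvSrc t) (pvTgt t)) (d + 1)) := by
  rw [dfsGo]

lemma dfsGo_empty (ts : List (List (String × String))) (d : Nat) (hd : d ≤ 10) :
    dfsGo ts "" d = true := by
  rw [dfsGo_unfold]
  simp [Nat.not_lt.mpr hd]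

lemma dfsGo_step (ts : List (List (String × String))) (s c : String) (d : Nat)
    (hd : d ≤ 10) (hc : Child ts s c) (h : dfsGo ts c (d + 1) = true) :
    dfsGo ts s d = true := by
  rcases hc with ⟨t, ht, hin, hrepl⟩
  rw [dfsGo_unfold]
  simp only [Nat.not_lt.mpr hd, if_false]
  by_cases hs : s = ""
  · simp [hs]
  · simp only [hs, if_false, List.any_eq_true]
    refine ⟨t, ht, ?_⟩
    simp only [Bool.and_eq_true]
    refine ⟨by simpa using hin, ?_⟩
    rw [← hrepl]; exact h

lemma dfsGo_inv (ts : List (List (String × String))) (s : String) (d : Nat)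
    (h : dfsGo ts s d = true) :
    d ≤ 10 ∧ (s = "" ∨ ∃ c, Child ts s c ∧ dfsGo ts c (d + 1) = true) := by
  rw [dfsGo_unfold] at h
  by_cases hd : 10 < d
  · simp [hd] at h
  · refine ⟨by omega, ?_⟩
    by_cases hs : s = ""
    · exact Or.inl hs
    · simp only [hd, if_false, hs, List.any_eq_true] at h
      rcases h with ⟨t, ht, hb⟩
      simp only [Bool.and_eq_true] at hb
      exact Or.inr ⟨_, ⟨t, ht, hb.1, rfl⟩, hb.2⟩

lemma dfsGo_mono (ts : List (List (String × String))) :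
    ∀ (k : Nat) (s : String) (d d' : Nat), d' ≤ d → 11 - d' ≤ k →
      dfsGo ts s d = true → dfsGo ts s d' = true := by
  intro k
  induction k with
  | zero =>
    intro s d d' hdd hk h
    have := (dfsGo_inv ts s d h).1
    omega
  | succ k ih =>
    intro s d d' hdd hk h
    rcases dfsGo_inv ts s d h with ⟨hd10, hcase⟩
    have hd' : d' ≤ 10 := by omega
    rcases hcase with hs | ⟨c, hc, hrec⟩
    · subst hs; exact dfsGo_empty ts d' hd'
    · have hrec' : dfsGo ts c (d' + 1) = true := ih c (d + 1) (d' + 1) (by omega) (by omega) hrec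
      exact dfsGo_step ts s c d' hd' hc hrec'

-- the BFS loop invariant: queue depths are nondecreasing and span at most two levels; each
-- visited string v was expanded at depth φ v ≤ 10 no later than anything still queued, with all
-- its children either visited or queued at depth ≤ φ v + 1
def BfsInv (ts : List (List (String × String))) (q : List (String × Nat)) (vis : List String) (φ : String → Nat) : Prop :=
  q.Pairwise (fun a b => a.2 ≤ b.2) ∧
  (∀ a ∈ q, ∀ b ∈ q, a.2 ≤ b.2 + 1) ∧
  (∀ v ∈ vis, ∀ a ∈ q, φ v ≤ a.2) ∧
  (∀ v ∈ vis, φ v ≤ 10 ∧ v ≠ "" ∧ ∀ c, Child ts v c → c ∈ vis ∨ ∃ dc, dc ≤ φ v + 1 ∧ (c, dc) ∈ q) ∧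
  (∀ v ∈ vis, ∀ c, Child ts v c → c ∈ vis → φ c ≤ φ v + 1)

-- a queue entry that still certifies success: unvisited, within depth, and DFS-successful
def Good (ts : List (List (String × String))) (q : List (String × Nat)) (vis : List String) : Prop :=
  ∃ a ∈ q, a.2 ≤ 10 ∧ dfsGo ts a.1 a.2 = true ∧ a.1 ∉ vis

lemma mem_bfsPushes_iff (ts : List (List (String × String))) (vis' : PySem.Set String)
    (s : String) (d : Nat) (z : String × Nat) :
    z ∈ bfsPushes ts vis' s d ↔
      ∃ c, Child ts s c ∧ c ∉ vis' ∧ z = (c, d + 1) := by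
  have key : ∀ (l : List (List (String × String))) (acc : List (String × Nat)),
      z ∈ l.foldl (fun acc transition =>
        let src := pvSrc transition
        let tgt := pvTgt transition
        if PySem.Str.isIn src s then
          let new_string := pyReplaceOne s src tgt
          if PySem.Set.contains vis' new_string then acc
          else acc ++ [(new_string, d + 1)]
        else acc) acc ↔
      z ∈ acc ∨ ∃ t ∈ l, PySem.Str.isIn (pvSrc t) s = true ∧
        pyReplaceOne s (pvSrc t) (pvTgt t) ∉ vis' ∧
        z = (pyReplaceOne s (pvSrc t) (pvTgt t), d + 1) := by
    intro l
    induction l with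
    | nil => intro acc; simp
    | cons t l ih =>
      intro acc
      rw [List.foldl_cons, ih]
      dsimp only
      by_cases h1 : PySem.Str.isIn (pvSrc t) s = true
      · by_cases h2 : PySem.Set.contains vis' (pyReplaceOne s (pvSrc t) (pvTgt t)) = true
        · have h2' : pyReplaceOne s (pvSrc t) (pvTgt t) ∈ vis' := by
            simpa [PySem.Set.contains_iff] using h2
          rw [if_pos h1, if_pos h2]
          constructor
          · rintro (hz | ⟨t', ht', h⟩)
            · exact Or.inl hz
            · exact Or.inr ⟨t', List.mem_cons_of_mem _ ht', h⟩
          · rintro (hz | ⟨t', ht', h⟩)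
            · exact Or.inl hz
            · rcases List.mem_cons.mp ht' with rfl | ht''
              · exact absurd h2' h.2.1
              · exact Or.inr ⟨t', ht'', h⟩
        · have h2' : pyReplaceOne s (pvSrc t) (pvTgt t) ∉ vis' := by
            simpa [PySem.Set.contains_iff] using h2
          rw [if_pos h1, if_neg h2]
          simp only [List.mem_append, List.mem_singleton]
          constructor
          · rintro ((hz | hz) | ⟨t', ht', h⟩)
            · exact Or.inl hz
            · exact Or.inr ⟨t, List.mem_cons_self .., h1, h2', hz⟩
            · exact Or.inr ⟨t', List.mem_cons_of_mem _ ht', h⟩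
          · rintro (hz | ⟨t', ht', h⟩)
            · exact Or.inl (Or.inl hz)
            · rcases List.mem_cons.mp ht' with rfl | ht''
              · exact Or.inl (Or.inr h.2.2)
              · exact Or.inr ⟨t', ht'', h⟩
      · rw [if_neg h1]
        constructor
        · rintro (hz | ⟨t', ht', h⟩)
          · exact Or.inl hz
          · exact Or.inr ⟨t', List.mem_cons_of_mem _ ht', h⟩
        · rintro (hz | ⟨t', ht', h⟩)
          · exact Or.inl hz
          · rcases List.mem_cons.mp ht' with rfl | ht''
            · exact absurd h.1 h1
            · exact Or.inr ⟨t', ht'', h⟩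
  rw [bfsPushes, key]
  simp only [List.not_mem_nil, false_or, Child]
  constructor
  · rintro ⟨t, ht, hin, hnv, rfl⟩
    exact ⟨_, ⟨t, ht, hin, rfl⟩, hnv, rfl⟩
  · rintro ⟨c, ⟨t, ht, hin, rfl⟩, hnv, rfl⟩
    exact ⟨t, ht, hin, hnv, rfl⟩

lemma vis_to_good' (ts : List (List (String × String))) (q : List (String × Nat))
    (vis : List String) (φ : String → Nat) (hInv : BfsInv ts q vis φ) :
    ∀ (b : Nat) (v : String) (d : Nat), v ∈ vis → φ v ≤ d → d ≤ 10 → 10 - d ≤ b →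
      dfsGo ts v d = true → Good ts q vis := by
  obtain ⟨inv1, inv2, inv3, inv4, inv5⟩ := hInv
  intro b
  induction b with
  | zero =>
    intro v d hv hφ hd hb hdfs
    rcases (inv4 v hv).2.1 with hne
    rcases (dfsGo_inv ts v d hdfs).2 with rfl | ⟨c, hc, hrec⟩
    · exact absurd rfl hne
    · have hd1 : d + 1 ≤ 10 := (dfsGo_inv ts c (d + 1) hrec).1
      omega
  | succ b ih =>
    intro v d hv hφ hd hb hdfs
    rcases (inv4 v hv) with ⟨hφ10, hne, hchild⟩
    rcases (dfsGo_inv ts v d hdfs).2 with rfl | ⟨c, hc, hrec⟩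
    · exact absurd rfl hne
    · have hd1 : d + 1 ≤ 10 := (dfsGo_inv ts c (d + 1) hrec).1
      by_cases hcv : c ∈ vis
      · have hφc : φ c ≤ φ v + 1 := inv5 v hv c hc hcv
        exact ih c (d + 1) hcv (by omega) hd1 (by omega) hrec
      · rcases hchild c hc with hcv' | ⟨dc, hdc, hmem⟩
        · exact absurd hcv' hcv
        · refine ⟨(c, dc), hmem, by omega, ?_, hcv⟩
          exact dfsGo_mono ts (11 - dc) c (d + 1) dc (by omega) (by omega) hrec

lemma bfs_sound (ts : List (List (String × String))) (C : Prop) :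
    ∀ (q : List (String × Nat)) (vis : PySem.Set String),
      (∀ a ∈ q, dfsGo ts a.1 a.2 = true → C) → bfsGo ts q vis = true → C := by
  intro q vis
  induction q, vis using bfsGo.induct ts with
  | case1 vis =>
    intro _ hrun
    rw [bfsGo] at hrun
    exact absurd hrun (by simp)
  | case2 s d rest vis hd =>
    intro _ hrun
    rw [bfsGo] at hrun
    simp [hd] at hrun
  | case3 d rest vis hd =>
    intro H _
    exact H ("", d) (List.mem_cons_self ..) (dfsGo_empty ts d (by omega))
  | case4 s d rest vis hd hne hcont ih =>
    intro H hrun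
    rw [bfsGo] at hrun
    simp only [hd, if_false, hne, hcont] at hrun
    exact ih (fun a ha => H a (List.mem_cons_of_mem _ ha)) hrun
  | case5 s d rest vis hd hne hcont vis' ih =>
    intro H hrun
    rw [bfsGo] at hrun
    simp only [hd, if_false, hne, hcont] at hrun
    refine ih ?_ hrun
    intro a ha hdfs
    rcases List.mem_append.mp ha with ha' | ha'
    · exact H a (List.mem_cons_of_mem _ ha') hdfs
    · rcases (mem_bfsPushes_iff ts _ s d a).mp ha' with ⟨c, hc, _, rfl⟩
      exact H (s, d) (List.mem_cons_self ..) (dfsGo_step ts s c d (by omega) hc hdfs)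

lemma bfs_complete (ts : List (List (String × String))) :
    ∀ (q : List (String × Nat)) (vis : PySem.Set String) (φ : String → Nat),
      BfsInv ts q vis φ → Good ts q vis → bfsGo ts q vis = true := by
  intro q vis
  induction q, vis using bfsGo.induct ts with
  | case1 vis =>
    intro φ _ hGood
    rcases hGood with ⟨a, ha, _⟩
    exact absurd ha (List.not_mem_nil)
  | case2 s d rest vis hd =>
    intro φ hInv hGood
    rcases hGood with ⟨a, ha, ha10, _⟩
    rcases List.mem_cons.mp ha with rfl | ha'
    · simp at ha10; omega
    · have := (List.pairwise_cons.mp hInv.1).1 a ha'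
      omega
  | case3 d rest vis hd =>
    intro φ _ _
    rw [bfsGo]
    simp [hd]
  | case4 s d rest vis hd hne hcont ih =>
    intro φ hInv hGood
    rw [bfsGo]
    simp only [hd, if_false, hne, hcont]
    obtain ⟨inv1, inv2, inv3, inv4, inv5⟩ := hInv
    have hsvis : s ∈ vis := by simpa [PySem.Set.contains_iff] using hcont
    have htail : ∀ a ∈ rest, d ≤ a.2 := fun a ha => (List.pairwise_cons.mp inv1).1 a ha
    refine ih φ ⟨(List.pairwise_cons.mp inv1).2, ?_, ?_, ?_, inv5⟩ ?_
    · exact fun a ha b hb => inv2 a (List.mem_cons_of_mem _ ha) b (List.mem_cons_of_mem _ hb)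
    · exact fun v hv a ha => inv3 v hv a (List.mem_cons_of_mem _ ha)
    · intro v hv
      refine ⟨(inv4 v hv).1, (inv4 v hv).2.1, ?_⟩
      intro c hc
      rcases (inv4 v hv).2.2 c hc with hcv | ⟨dc, hdc, hmem⟩
      · exact Or.inl hcv
      · rcases List.mem_cons.mp hmem with heq | hmem'
        · exact Or.inl (by rw [show c = s from congrArg Prod.fst heq]; exact hsvis)
        · exact Or.inr ⟨dc, hdc, hmem'⟩
    · rcases hGood with ⟨a, ha, ha10, hdfs, hnv⟩
      rcases List.mem_cons.mp ha with rfl | ha'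
      · exact absurd hsvis hnv
      · exact ⟨a, ha', ha10, hdfs, hnv⟩
  | case5 s d rest vis hd hne hcont vis' ih =>
    intro φ hInv hGood
    rw [bfsGo]
    simp only [hd, if_false, hne, hcont]
    obtain ⟨inv1, inv2, inv3, inv4, inv5⟩ := hInv
    have hsnv : s ∉ vis := by simpa [PySem.Set.contains_iff] using hcont
    have hadd : PySem.Set.add vis s = vis ++ [s] := by
      simp [PySem.Set.add, hsnv]
    have htail : ∀ a ∈ rest, d ≤ a.2 := fun a ha => (List.pairwise_cons.mp inv1).1 a ha
    set φ' : String → Nat := fun x => if x = s then d else φ x with hφ'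
    have hφs : φ' s = d := by simp [hφ']
    have hφold : ∀ v ∈ vis, φ' v = φ v := by
      intro v hv
      have : v ≠ s := fun h => hsnv (h ▸ hv)
      simp [hφ', this]
    have hmemvis' : ∀ c, c ∈ PySem.Set.add vis s ↔ c ∈ vis ∨ c = s := by
      intro c; rw [hadd]; simp
    have hPdep : ∀ z ∈ bfsPushes ts (PySem.Set.add vis s) s d,
        z.2 = d + 1 ∧ z.1 ∉ PySem.Set.add vis s ∧ Child ts s z.1 := by
      intro z hz
      rcases (mem_bfsPushes_iff ts _ s d z).mp hz with ⟨c, hc, hnv, rfl⟩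
      exact ⟨rfl, hnv, hc⟩
    have hPin : ∀ c, Child ts s c → c ∉ PySem.Set.add vis s →
        (c, d + 1) ∈ bfsPushes ts (PySem.Set.add vis s) s d := by
      intro c hc hnv
      exact (mem_bfsPushes_iff ts _ s d (c, d + 1)).mpr ⟨c, hc, hnv, rfl⟩
    have hInv' : BfsInv ts (rest ++ bfsPushes ts (PySem.Set.add vis s) s d) (PySem.Set.add vis s) φ' := by
      refine ⟨?_, ?_, ?_, ?_, ?_⟩
      · rw [List.pairwise_append]
        refine ⟨(List.pairwise_cons.mp inv1).2, ?_, ?_⟩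
        · exact List.pairwise_of_forall_mem_list (fun a ha b hb => by
            rw [(hPdep a ha).1, (hPdep b hb).1])
        · intro a ha b hb
          rw [(hPdep b hb).1]
          exact inv2 a (List.mem_cons_of_mem _ ha) (s, d) (List.mem_cons_self ..)
      · intro a ha b hb
        rcases List.mem_append.mp ha with ha' | ha' <;> rcases List.mem_append.mp hb with hb' | hb'
        · exact inv2 a (List.mem_cons_of_mem _ ha') b (List.mem_cons_of_mem _ hb')
        · rw [(hPdep b hb').1]
          have := inv2 a (List.mem_cons_of_mem _ ha') (s, d) (List.mem_cons_self ..)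
          omega
        · rw [(hPdep a ha').1]
          have := htail b hb'
          omega
        · rw [(hPdep a ha').1, (hPdep b hb').1]
          omega
      · intro v hv a ha
        rcases (hmemvis' v).mp hv with hv' | hvs
        · rw [hφold v hv']
          rcases List.mem_append.mp ha with ha' | ha'
          · exact inv3 v hv' a (List.mem_cons_of_mem _ ha')
          · rw [(hPdep a ha').1]
            have := inv3 v hv' (s, d) (List.mem_cons_self ..)
            omega
        · subst hvs
          rw [hφs]
          rcases List.mem_append.mp ha with ha' | ha'
          · exact htail a ha'
          · rw [(hPdep a ha').1]; omega
      · intro v hv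
        rcases (hmemvis' v).mp hv with hv' | hvs
        · rw [hφold v hv']
          refine ⟨(inv4 v hv').1, (inv4 v hv').2.1, ?_⟩
          intro c hc
          rcases (inv4 v hv').2.2 c hc with hcv | ⟨dc, hdc, hmem⟩
          · exact Or.inl ((hmemvis' c).mpr (Or.inl hcv))
          · rcases List.mem_cons.mp hmem with heq | hmem'
            · exact Or.inl ((hmemvis' c).mpr (Or.inr (congrArg Prod.fst heq)))
            · exact Or.inr ⟨dc, hdc, List.mem_append_left _ hmem'⟩
        · subst hvs
          rw [hφs]
          refine ⟨by omega, hne, ?_⟩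
          intro c hc
          by_cases hcv : c ∈ PySem.Set.add vis v
          · exact Or.inl hcv
          · exact Or.inr ⟨d + 1, by omega, List.mem_append_right _ (hPin c hc hcv)⟩
      · intro v hv c hc hcv
        rcases (hmemvis' v).mp hv with hv' | hvs
        · rcases (hmemvis' c).mp hcv with hcv' | hcs
          · rw [hφold v hv', hφold c hcv']
            exact inv5 v hv' c hc hcv'
          · subst hcs
            rw [hφold v hv', hφs]
            rcases (inv4 v hv').2.2 c hc with hcv'' | ⟨dc, hdc, hmem⟩
            · exact absurd hcv'' hsnv
            · rcases List.mem_cons.mp hmem with heq | hmem'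
              · have hdd : dc = d := congrArg Prod.snd heq
                omega
              · have := htail _ hmem'
                omega
        · subst hvs
          rcases (hmemvis' c).mp hcv with hcv' | hcs
          · rw [hφs, hφold c hcv']
            have := inv3 c hcv' (v, d) (List.mem_cons_self ..)
            omega
          · subst hcs
            omega
    refine ih φ' hInv' ?_
    rcases hGood with ⟨a, ha, ha10, hdfs, hnv⟩
    by_cases has : a.1 = s
    · -- the good entry's string is the one being visited: route through vis_to_good'
      have hda : d ≤ a.2 := by
        rcases List.mem_cons.mp ha with rfl | ha'
        · exact le_refl _
        · exact htail a ha'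
      refine vis_to_good' ts _ _ φ' hInv' (10 - a.2) s a.2
        ((hmemvis' s).mpr (Or.inr rfl)) (by rw [hφs]; omega) ha10 (by omega) (has ▸ hdfs)
    · have ha' : a ∈ rest := by
        rcases List.mem_cons.mp ha with rfl | ha'
        · exact absurd rfl has
        · exact ha'
      exact ⟨a, List.mem_append_left _ ha', ha10, hdfs, fun h => by
        rcases (hmemvis' a.1).mp h with h' | h'
        · exact hnv h'
        · exact has h'⟩

-- ===== VERDICT (by name: the statement is the Claim_ definition above) =====
theorem can_reduce_to_empty_spec : Claim_equal_can_reduce_to_empty := by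
  intro init ts _ _
  unfold Spec_can_reduce_to_empty can_reduce_to_empty can_reduce_to_empty_alt
  cases hB : dfsGo ts init 0 with
  | true =>
    apply bfs_complete ts [(init, 0)] PySem.Set.empty (fun _ => 0)
    · refine ⟨by simp, by simp, by simp [PySem.Set.empty], by simp [PySem.Set.empty], by simp [PySem.Set.empty]⟩
    · exact ⟨(init, 0), by simp, by simp, hB, by simp [PySem.Set.empty]⟩
  | false =>
    by_contra hne
    rw [Bool.not_eq_false] at hne
    have := bfs_sound ts (dfsGo ts init 0 = true) [(init, 0)] PySem.Set.empty
      (by rintro a ha hda; simp only [List.mem_singleton] at ha; subst ha; exact hda) hne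
    rw [hB] at this; exact absurd this (by simp)
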